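-- pv_equiv track=rewrite | github.com/psiudo/Algorithm | PyPy3/백준/Gold/20327. 배열 돌리기 6/배열 돌리기 6.py | execute_basic_operate
-- ===== SOURCE A (Python) =====
-- def execute_basic_operate(mode, sub):
--     if mode == 1 :
--         sub = sub[::-1]
--     elif mode == 2 :
--         sub = [row[::-1] for row in sub]
--     if mode == 3 :
--         sub = [row[::-1] for row in list(map(list, zip(*sub)))]
--     elif mode == 4 :
--         sub = list(map(list, zip(*sub)))[::-1]
--     return sub
-- ===== SOURCE B (Python) =====
-- def execute_basic_operate(mode, sub):
--     n = len(sub)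
--     if mode == 1:
--         out = []
--         for i in range(n):
--             src = sub[n - 1 - i]
--             out.append([src[j] for j in range(len(src))])
--         return out
--     if mode == 2:
--         out = []
--         for row in sub:
--             c = len(row)
--             out.append([row[c - 1 - j] for j in range(c)])
--         return out
--     if mode == 3 or mode == 4:
--         m = min((len(r) for r in sub), default=0)
--         out = []
--         for i in range(m):
--             if mode == 3:
--                 out.append([sub[n - 1 - j][i] for j in range(n)])
--             else:
--                 out.append([sub[j][m - 1 - i] for j in range(n)])
--         return out
--     return sub
-- ===== Notes on version B (the rewrite author's own statement) =====
-- stated objective: alternative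
-- what changed: Replaces A's slice/zip compositions (reverse slices, transpose via zip(*sub) then reverse) with a single coordinate-remapping pass per mode: explicit index loops that place out[i][j] directly from sub via a per-mode index formula, with the output shape for rotations computed from len(sub) and the minimum row length.
import Mathlib
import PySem

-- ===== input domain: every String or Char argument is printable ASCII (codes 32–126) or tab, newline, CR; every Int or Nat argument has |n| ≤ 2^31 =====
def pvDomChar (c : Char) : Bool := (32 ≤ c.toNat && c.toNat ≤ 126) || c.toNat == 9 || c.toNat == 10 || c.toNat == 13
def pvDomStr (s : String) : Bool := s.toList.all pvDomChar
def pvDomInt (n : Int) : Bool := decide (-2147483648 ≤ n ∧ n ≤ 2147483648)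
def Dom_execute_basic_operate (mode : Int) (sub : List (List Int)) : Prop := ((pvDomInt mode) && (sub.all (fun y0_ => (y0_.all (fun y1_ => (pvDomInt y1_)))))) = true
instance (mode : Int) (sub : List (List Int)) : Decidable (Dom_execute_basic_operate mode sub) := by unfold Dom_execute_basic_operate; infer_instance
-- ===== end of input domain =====

-- B is an alternative decomposition: one direct coordinate-remapping pass per mode instead of
-- A's slice/zip compositions; equal return value on all inputs (A is total).

-- ===== PORT A =====
-- zip(*rows) as Python computes it: columns while every row still has an element;
-- fuel = length of the first row bounds the number of iterations (exact, see zipStarAux_eq below).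
def zipStarAux : Nat → List (List Int) → List (List Int)
  | 0, _ => []
  | fuel + 1, rows =>
      if rows.all (fun r => !r.isEmpty) then
        (rows.map (fun r => r.headD 0)) :: zipStarAux fuel (rows.map (fun r => r.tail))
      else []

def pyZipStar (rows : List (List Int)) : List (List Int) :=
  if rows.isEmpty then [] else zipStarAux (rows.headD []).length rows

def execute_basic_operate (mode : Int) (sub : List (List Int)) : List (List Int) :=
  -- first if/elif pair: sub[::-1] / rows reversed (PySem.List.slice? … (-1) = reverse, cited lemma)
  let sub1 := if mode = 1 then sub.reverse
              else if mode = 2 then sub.map (fun row => row.reverse)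
              else sub
  -- second if/elif pair
  if mode = 3 then (pyZipStar sub1).map (fun row => row.reverse)
  else if mode = 4 then (pyZipStar sub1).reverse
  else sub1

-- ===== PORT B =====
-- min((len(r) for r in sub), default=0)
def minLenB : List (List Int) → Nat
  | [] => 0
  | [r] => r.length
  | r :: rs => min r.length (minLenB rs)

def execute_basic_operate_alt (mode : Int) (sub : List (List Int)) : List (List Int) :=
  let n := sub.length
  if mode = 1 then
    (List.range n).map (fun i =>
      let src := sub.getD (n - 1 - i) []
      (List.range src.length).map (fun j => src.getD j 0))
  else if mode = 2 then
    sub.map (fun row => (List.range row.length).map (fun j => row.getD (row.length - 1 - j) 0))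
  else if mode = 3 ∨ mode = 4 then
    let m := minLenB sub
    (List.range m).map (fun i =>
      if mode = 3 then (List.range n).map (fun j => (sub.getD (n - 1 - j) []).getD i 0)
      else (List.range n).map (fun j => (sub.getD j []).getD (m - 1 - i) 0))
  else sub

-- ===== PRECONDITION & SPEC =====
def Spec_execute_basic_operate (mode : Int) (sub : List (List Int)) (out : List (List Int)) : Prop := out = execute_basic_operate_alt mode sub
instance (mode : Int) (sub : List (List Int)) (out : List (List Int)) : Decidable (Spec_execute_basic_operate mode sub out) := by unfold Spec_execute_basic_operate; infer_instance

-- ===== CLAIM (what is proved, stated in full; the proofs are below) =====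
def Claim_equal_execute_basic_operate : Prop := ∀ (mode : Int) (sub : List (List Int)), Dom_execute_basic_operate mode sub → Spec_execute_basic_operate mode sub (execute_basic_operate mode sub)

-- ===== LEMMAS AND PROOFS =====

-- index-reversed range map is a reversed map
theorem map_range_rev {α β : Type} (xs : List α) (d : α) (f : α → β) :
    (List.range xs.length).map (fun i => f (xs.getD (xs.length - 1 - i) d)) = (xs.map f).reverse := by
  apply List.ext_getElem
  · simp
  · intro i h1 h2
    simp only [List.length_map, List.length_range, List.length_reverse] at h1 h2
    simp only [List.getElem_map, List.getElem_range, List.getElem_reverse, List.length_map]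
    rw [List.getD_eq_getElem _ _ (by omega)]

theorem map_range_rev_idx {β : Type} (m : Nat) (g : Nat → β) :
    (List.range m).map (fun i => g (m - 1 - i)) = ((List.range m).map g).reverse := by
  apply List.ext_getElem
  · simp
  · intro i h1 h2
    simp only [List.length_map, List.length_range, List.length_reverse] at h1 h2
    simp only [List.getElem_map, List.getElem_range, List.getElem_reverse,
      List.length_map, List.length_range]

-- range-indexed map is a map
theorem map_range_getD {α β : Type} (xs : List α) (d : α) (f : α → β) :
    (List.range xs.length).map (fun j => f (xs.getD j d)) = xs.map f := by
  apply List.ext_getElem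
  · simp
  · intro i h1 h2
    simp only [List.length_map, List.length_range] at h1 h2
    simp only [List.getElem_map, List.getElem_range]
    rw [List.getD_eq_getElem _ _ (by omega)]

theorem minLenB_cons (r : List Int) (rs : List (List Int)) (h : rs ≠ []) :
    minLenB (r :: rs) = min r.length (minLenB rs) := by
  cases rs with
  | nil => exact absurd rfl h
  | cons a as => rfl

theorem minLenB_le_head (r : List Int) (rs : List (List Int)) :
    minLenB (r :: rs) ≤ r.length := by
  cases rs with
  | nil => simp [minLenB]
  | cons a as => simp [minLenB_cons r (a :: as) (by simp)]

theorem minLenB_zero_of_empty_mem (rows : List (List Int)) (h : ¬ rows.all (fun r => !r.isEmpty)) :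
    minLenB rows = 0 := by
  induction rows with
  | nil => simp at h
  | cons r rs ih =>
    simp only [List.all_cons, Bool.and_eq_true, Bool.not_eq_true'] at h
    by_cases hr : r = []
    · cases rs with
      | nil => simp [hr, minLenB]
      | cons a as =>
        rw [minLenB_cons _ _ (by simp)]
        simp [hr]
    · have hrs : ¬ rs.all (fun r => !r.isEmpty) := by
        intro hc
        exact h ⟨by simpa [List.isEmpty_iff] using hr, hc⟩
      cases rs with
      | nil => simp [List.all_nil] at hrs
      | cons a as =>
        rw [minLenB_cons r (a :: as) (by simp), ih hrs]
        simp

theorem minLenB_tail (rows : List (List Int)) (h : rows.all (fun r => !r.isEmpty)) :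
    minLenB (rows.map (fun r => r.tail)) = minLenB rows - 1 := by
  induction rows with
  | nil => simp [minLenB]
  | cons r rs ih =>
    simp only [List.all_cons, Bool.and_eq_true, Bool.not_eq_true'] at h
    obtain ⟨hr, hrs⟩ := h
    cases rs with
    | nil => simp [minLenB, List.length_tail]
    | cons a as =>
      rw [List.map_cons, minLenB_cons _ _ (by simp),
        minLenB_cons r (a :: as) (by simp), ih hrs, List.length_tail]
      omega

theorem minLenB_pos (rows : List (List Int)) (hne : rows ≠ [])
    (h : rows.all (fun r => !r.isEmpty)) : 0 < minLenB rows := by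
  induction rows with
  | nil => exact absurd rfl hne
  | cons r rs ih =>
    simp only [List.all_cons, Bool.and_eq_true, Bool.not_eq_true'] at h
    obtain ⟨hr, hrs⟩ := h
    have hrne : r ≠ [] := by simpa [List.isEmpty_iff] using hr
    have hrpos : 0 < r.length := List.length_pos_iff.mpr hrne
    cases rs with
    | nil => simpa [minLenB]
    | cons a as =>
      rw [minLenB_cons r (a :: as) (by simp)]
      have hpos := ih (by simp) hrs
      omega

theorem zipStarAux_eq (fuel : Nat) (rows : List (List Int)) (hne : rows ≠ [])
    (hfuel : minLenB rows ≤ fuel) :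
    zipStarAux fuel rows = (List.range (minLenB rows)).map (fun i => rows.map (fun r => r.getD i 0)) := by
  induction fuel generalizing rows with
  | zero =>
    have : minLenB rows = 0 := Nat.le_zero.mp hfuel
    simp [zipStarAux, this]
  | succ f ih =>
    by_cases hall : rows.all (fun r => !r.isEmpty)
    · have hpos := minLenB_pos rows hne hall
      rw [zipStarAux, if_pos hall]
      have htail : minLenB (rows.map (fun r => r.tail)) = minLenB rows - 1 :=
        minLenB_tail rows hall
      have hne' : rows.map (fun r => r.tail) ≠ [] := by
        simpa using hne
      rw [ih (rows.map (fun r => r.tail)) hne' (by omega), htail]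
      obtain ⟨m, hm⟩ : ∃ m, minLenB rows = m + 1 := ⟨minLenB rows - 1, by omega⟩
      rw [hm]
      simp only [Nat.add_sub_cancel, List.range_succ_eq_map, List.map_cons, List.map_map]
      congr 1
      · apply List.map_congr_left
        intro r _
        cases r <;> simp [List.getD]
      · apply List.map_congr_left
        intro i _
        simp only [Function.comp]
        apply List.map_congr_left
        intro r _
        cases r <;> simp [List.getD]
    · rw [zipStarAux, if_neg hall, minLenB_zero_of_empty_mem rows hall]
      simp

theorem pyZipStar_eq (rows : List (List Int)) :
    pyZipStar rows = (List.range (minLenB rows)).map (fun i => rows.map (fun r => r.getD i 0)) := by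
  unfold pyZipStar
  by_cases h : rows = []
  · simp [h, minLenB]
  · rw [if_neg (by simpa [List.isEmpty_iff] using h)]
    apply zipStarAux_eq _ _ h
    cases rows with
    | nil => exact absurd rfl h
    | cons r rs =>
      simp only [List.headD_cons]
      exact minLenB_le_head r rs

-- B's mode-1 coordinate remap is reversal
theorem alt_mode1 (sub : List (List Int)) :
    (List.range sub.length).map (fun i =>
      (List.range (sub.getD (sub.length - 1 - i) []).length).map
        (fun j => (sub.getD (sub.length - 1 - i) []).getD j 0)) = sub.reverse := by
  have hinner : ∀ src : List Int, (List.range src.length).map (fun j => src.getD j 0) = src :=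
    fun src => by simpa using map_range_getD src 0 (fun x => x)
  calc (List.range sub.length).map (fun i =>
          (List.range (sub.getD (sub.length - 1 - i) []).length).map
            (fun j => (sub.getD (sub.length - 1 - i) []).getD j 0))
      = (List.range sub.length).map (fun i => (fun r => r) (sub.getD (sub.length - 1 - i) [])) := by
        apply List.map_congr_left; intro i _; exact hinner _
    _ = (sub.map (fun r => r)).reverse := map_range_rev sub [] (fun r => r)
    _ = sub.reverse := by simp

-- ===== VERDICT (by name: the statement is the Claim_ definition above) =====
theorem execute_basic_operate_spec : Claim_equal_execute_basic_operate := by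
  intro mode sub _
  unfold Spec_execute_basic_operate execute_basic_operate execute_basic_operate_alt
  by_cases h1 : mode = 1
  · subst h1
    simp only [if_neg (by decide : ¬(1:Int) = 3), if_neg (by decide : ¬(1:Int) = 4)]
    exact (alt_mode1 sub).symm
  · by_cases h2 : mode = 2
    · subst h2
      simp only [if_neg (by decide : ¬(2:Int) = 1),
        if_neg (by decide : ¬(2:Int) = 3), if_neg (by decide : ¬(2:Int) = 4)]
      apply List.map_congr_left
      intro row _
      have h := map_range_rev row 0 (fun x => x)
      simpa using h.symm
    · by_cases h3 : mode = 3
      · subst h3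
        simp only [if_neg (by decide : ¬(3:Int) = 1), if_neg (by decide : ¬(3:Int) = 2)]
        rw [pyZipStar_eq, List.map_map]
        apply List.map_congr_left
        intro i _
        exact (map_range_rev sub [] (fun r => r.getD i 0)).symm
      · by_cases h4 : mode = 4
        · subst h4
          simp only [if_neg (by decide : ¬(4:Int) = 1), if_neg (by decide : ¬(4:Int) = 2),
            if_neg (by decide : ¬(4:Int) = 3)]
          rw [pyZipStar_eq, ← map_range_rev_idx (minLenB sub)
            (fun i => sub.map (fun r => r.getD i 0))]
          apply List.map_congr_left
          intro i _
          exact (map_range_getD sub [] (fun r => r.getD (minLenB sub - 1 - i) 0)).symm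
        · simp [h1, h2, h3, h4]
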